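-- pv_equiv track=rewrite | github.com/OJWills/Bibliometric-analysis-of-publications | code.py | replace_ambiguous_authors
-- ===== SOURCE A (Python) =====
-- def replace_ambiguous_authors(d, authors, author_lists):
--     """
--     Generates list of dismbiguated authors
--     Input: Dictionary of related names, list of authors from paper
--     Output:List of unambiguous authors with related names replaced by consistent name
--     """
--
--     unambiguous_authors, unambiguous_author_lists = [], []
--
--     for author_list in author_lists:
--         temp = []
--         for author in author_list:
--             x = 0
--             for key in d:
--                 if author in d[key]:
--                     temp.append(key)
--                     unambiguous_authors.append(key)
--                     x+=1
--             if x == 0: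
--                 temp.append(author)
--                 unambiguous_authors.append(author)
--
--         unambiguous_author_lists.append(temp)
--
--     return (unambiguous_authors, unambiguous_author_lists)
-- ===== SOURCE B (Python) =====
-- def replace_ambiguous_authors(d, authors, author_lists):
--     """
--     Generates list of dismbiguated authors
--     Input: Dictionary of related names, list of authors from paper
--     Output:List of unambiguous authors with related names replaced by consistent name
--     """
--     # Invert d once: alias -> list of canonical keys (key order; one entry per key,
--     # so aliases duplicated inside one key's list are deduplicated first).
--     pairs = [(alias, key) for key in d for alias in dict.fromkeys(d[key])]
--     index = {}
--     for alias, key in pairs: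
--         index.setdefault(alias, []).append(key)
--
--     unambiguous_authors, unambiguous_author_lists = [], []
--     for author_list in author_lists:
--         temp = []
--         for author in author_list:
--             temp += index.get(author, [author])
--         unambiguous_author_lists.append(temp)
--         unambiguous_authors += temp
--     return (unambiguous_authors, unambiguous_author_lists)
-- ===== Notes on version B (the rewrite author's own statement) =====
-- stated objective: faster
-- what changed: B inverts the dictionary once into an alias->canonical-keys index (deduplicating aliases per key), so each author is resolved by a single dict lookup with fallback instead of A's inner scan over every key's alias list per author.
import Mathlib
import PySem

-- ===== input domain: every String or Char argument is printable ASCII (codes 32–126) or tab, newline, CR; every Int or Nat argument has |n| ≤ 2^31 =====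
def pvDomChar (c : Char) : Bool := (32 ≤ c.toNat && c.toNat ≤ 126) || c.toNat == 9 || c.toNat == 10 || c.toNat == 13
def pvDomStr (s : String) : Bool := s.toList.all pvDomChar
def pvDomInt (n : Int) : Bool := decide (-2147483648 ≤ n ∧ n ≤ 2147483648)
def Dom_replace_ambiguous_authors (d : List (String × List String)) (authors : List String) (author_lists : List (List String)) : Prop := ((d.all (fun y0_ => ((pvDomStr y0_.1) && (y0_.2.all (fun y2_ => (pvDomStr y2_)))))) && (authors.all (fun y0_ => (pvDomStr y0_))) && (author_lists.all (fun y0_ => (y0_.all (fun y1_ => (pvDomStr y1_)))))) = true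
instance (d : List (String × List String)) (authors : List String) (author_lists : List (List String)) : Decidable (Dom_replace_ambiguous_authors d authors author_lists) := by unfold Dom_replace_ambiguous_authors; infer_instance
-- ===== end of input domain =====

-- B inverts the dictionary once into an alias -> canonical-keys index, replacing
-- A's per-author scan over all keys by a single lookup; equivalence proved on Dom.


-- ===== PORT A =====
-- literal transliteration of A: 'for key in d: if author in d[key]' with counter x,
-- dual accumulators unambiguous_authors / unambiguous_author_lists; each loop is a foldl
-- over its named body (state q = (unambiguous_authors, temp, x), p = (unambiguous_authors, temp)).
def aKeyBody (dd : PySem.Dict String (List String)) (author : String)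
    (q : List String × List String × Int) (key : String) : List String × List String × Int :=
  if (dd.getD key []).contains author then (q.1 ++ [key], q.2.1 ++ [key], q.2.2 + 1) else q

def aAuthorBody (dd : PySem.Dict String (List String))
    (p : List String × List String) (author : String) : List String × List String :=
  let q := dd.keys.foldl (aKeyBody dd author) (p.1, p.2, (0 : Int))
  if q.2.2 == 0 then (q.1 ++ [author], q.2.1 ++ [author]) else (q.1, q.2.1)

def aListBody (dd : PySem.Dict String (List String))
    (acc : List String × List (List String)) (author_list : List String) :
    List String × List (List String) :=
  let inner := author_list.foldl (aAuthorBody dd) (acc.1, ([] : List String))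
  (inner.1, acc.2 ++ [inner.2])

def replace_ambiguous_authors (d : List (String × List String)) (authors : List String) (author_lists : List (List String)) : List String × List (List String) :=
  let dd := PySem.Dict.ofList d
  let st := author_lists.foldl (aListBody dd) (([] : List String), ([] : List (List String)))
  (st.1, st.2)

-- ===== PORT B =====
-- pairs = [(alias, key) for key in d for alias in dict.fromkeys(d[key])]
def bPairs (dd : PySem.Dict String (List String)) : List (String × String) :=
  dd.items.flatMap (fun p => (PySem.List.dedup p.2).map (fun al => (al, p.1)))

-- for alias, key in pairs: index.setdefault(alias, []).append(key)
def bIndex (dd : PySem.Dict String (List String)) : PySem.Dict String (List String) :=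
  (bPairs dd).foldl (fun i q => i.modify q.1 [] (· ++ [q.2])) PySem.Dict.empty

def bListBody (idx : PySem.Dict String (List String))
    (acc : List String × List (List String)) (author_list : List String) :
    List String × List (List String) :=
  let temp := author_list.foldl (fun t author => t ++ idx.getD author [author]) []
  (acc.1 ++ temp, acc.2 ++ [temp])

def replace_ambiguous_authors_alt (d : List (String × List String)) (authors : List String) (author_lists : List (List String)) : List String × List (List String) :=
  let dd := PySem.Dict.ofList d
  let idx := bIndex dd
  let st := author_lists.foldl (bListBody idx) (([] : List String), ([] : List (List String)))
  (st.1, st.2)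

-- ===== PRECONDITION & SPEC =====
def Spec_replace_ambiguous_authors (d : List (String × List String)) (authors : List String) (author_lists : List (List String)) (out : List String × List (List String)) : Prop := out = replace_ambiguous_authors_alt d authors author_lists
instance (d : List (String × List String)) (authors : List String) (author_lists : List (List String)) (out : List String × List (List String)) : Decidable (Spec_replace_ambiguous_authors d authors author_lists out) := by unfold Spec_replace_ambiguous_authors; infer_instance

-- ===== CLAIM =====
def Claim_equal_replace_ambiguous_authors : Prop := ∀ (d : List (String × List String)) (authors : List String) (author_lists : List (List String)), Dom_replace_ambiguous_authors d authors author_lists → Spec_replace_ambiguous_authors d authors author_lists (replace_ambiguous_authors d authors author_lists)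

-- ===== LEMMAS AND PROOFS =====

-- the value both programs produce for one author: matching keys, or the author itself
def pvResolve (dd : PySem.Dict String (List String)) (author : String) : List String :=
  let keys := dd.keys.filter (fun key => (dd.getD key []).contains author)
  if keys.isEmpty then [author] else keys

-- A's innermost key loop appends exactly the matching keys to both accumulators and counts them.
lemma innerFold_eq (dd : PySem.Dict String (List String)) (author : String)
    (keys : List String) (u t : List String) (x : Int) :
    keys.foldl (aKeyBody dd author) (u, t, x)
    = (u ++ keys.filter (fun key => (dd.getD key []).contains author),
       t ++ keys.filter (fun key => (dd.getD key []).contains author),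
       x + (keys.filter (fun key => (dd.getD key []).contains author)).length) := by
  induction keys generalizing u t x with
  | nil => simp
  | cons k ks ih =>
    rw [List.foldl_cons, List.filter_cons]
    cases h : (dd.getD k []).contains author with
    | false =>
      rw [aKeyBody, if_neg (by simpa using h), if_neg (by simpa using h), ih]
    | true =>
      rw [aKeyBody, if_pos (by simpa using h), if_pos (by simpa using h), ih]
      refine Prod.ext ?_ (Prod.ext ?_ ?_) <;> simp <;> omega

-- A's per-author body appends pvResolve to both accumulators.
lemma authorStep_eq (dd : PySem.Dict String (List String)) (author : String)
    (u t : List String) :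
    aAuthorBody dd (u, t) author = (u ++ pvResolve dd author, t ++ pvResolve dd author) := by
  rw [aAuthorBody, pvResolve]
  rw [innerFold_eq]
  by_cases h : dd.keys.filter (fun key => (dd.getD key []).contains author) = []
  · rw [h]
    simp
  · have hlen : (dd.keys.filter (fun key => (dd.getD key []).contains author)).length ≠ 0 := by
      simpa [List.length_eq_zero_iff] using h
    rw [if_neg (by simp only [beq_iff_eq, zero_add, Int.natCast_eq_zero]; exact hlen),
        if_neg (by rw [List.isEmpty_iff]; exact h)]

-- A's middle loop over one author_list, starting from (u, t).
lemma listFold_eq (dd : PySem.Dict String (List String)) (al : List String)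
    (u t : List String) :
    al.foldl (aAuthorBody dd) (u, t)
    = (u ++ al.flatMap (pvResolve dd), t ++ al.flatMap (pvResolve dd)) := by
  induction al generalizing u t with
  | nil => simp
  | cons a as ih =>
    rw [List.foldl_cons, authorStep_eq, ih]
    simp

-- A's outer loop from (u, L).
lemma outerFold_eq (dd : PySem.Dict String (List String)) (als : List (List String))
    (u : List String) (L : List (List String)) :
    als.foldl (aListBody dd) (u, L)
    = (u ++ (als.map (fun al => al.flatMap (pvResolve dd))).flatten,
       L ++ als.map (fun al => al.flatMap (pvResolve dd))) := by
  induction als generalizing u L with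
  | nil => simp
  | cons al rest ih =>
    rw [List.foldl_cons, aListBody]
    rw [show al.foldl (aAuthorBody dd) (u, ([] : List String))
          = (u ++ al.flatMap (pvResolve dd), al.flatMap (pvResolve dd)) by
        rw [listFold_eq]; simp]
    rw [ih]
    simp

-- in a duplicate-free list, keeping the elements equal to a leaves [a] when a is present
lemma filter_beq_of_nodup {l : List String} (hnd : l.Nodup) {a : String} (h : a ∈ l) :
    l.filter (· == a) = [a] := by
  induction l with
  | nil => cases h
  | cons x xs ih =>
    rw [List.filter_cons]
    by_cases hxa : x = a
    · subst hxa
      rw [if_pos (by simp)]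
      rw [List.filter_eq_nil_iff.2 (fun y hy => by
            simp only [beq_iff_eq]; rintro rfl; exact (List.nodup_cons.1 hnd).1 hy)]
    · rw [if_neg (by simpa using hxa)]
      exact ih (List.nodup_cons.1 hnd).2 ((List.mem_cons.1 h).resolve_left fun he => hxa he.symm)

-- the matching keys of pairs for one alias are the keys whose alias list contains it
lemma pairs_filter_eq (items : List (String × List String)) (a : String) :
    (((items.flatMap (fun p => (PySem.List.dedup p.2).map (fun al => (al, p.1)))).filter
        (fun q => q.1 == a)).map (·.2))
    = (items.filter (fun p => decide (a ∈ p.2))).map (·.1) := by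
  induction items with
  | nil => simp
  | cons p rest ih =>
    rw [List.flatMap_cons, List.filter_append, List.map_append, ih, List.filter_cons]
    have hform : ((PySem.List.dedup p.2).map (fun al => (al, p.1))).filter (fun q => q.1 == a)
        = ((PySem.List.dedup p.2).filter (· == a)).map (fun al => (al, p.1)) := by
      rw [List.filter_map]
      rfl
    by_cases h : a ∈ p.2
    · rw [if_pos (by simpa using h)]
      rw [hform, filter_beq_of_nodup (PySem.List.nodup_dedup p.2) ((PySem.List.mem_dedup p.2 a).2 h)]
      simp
    · rw [if_neg (by simpa using h)]
      rw [hform, List.filter_eq_nil_iff.2 (fun y hy => by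
            simp only [beq_iff_eq]; rintro rfl; exact h ((PySem.List.mem_dedup _ _).1 hy))]
      simp

-- the matching keys, phrased over dd.items, equal the matching keys phrased over dd.keys
lemma keys_filter_eq (dd : PySem.Dict String (List String)) (hnd : dd.keys.Nodup) (a : String) :
    (dd.items.filter (fun p => decide (a ∈ p.2))).map (·.1)
    = dd.keys.filter (fun key => (dd.getD key []).contains a) := by
  rw [PySem.Dict.items_eq_map_keys dd hnd []]
  rw [List.filter_map, List.map_map]
  simp [Function.comp_def]

-- B's lookup with fallback equals pvResolve
lemma lookup_eq_resolve (dd : PySem.Dict String (List String)) (hnd : dd.keys.Nodup)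
    (a : String) : (bIndex dd).getD a [a] = pvResolve dd a := by
  have hbase : (bIndex dd).getD a []
      = ((bPairs dd).filter (fun q => q.1 == a)).map (·.2) := by
    have h := PySem.Dict.getD_foldl_modify_append (bPairs dd) PySem.Dict.empty a
    simpa [bIndex] using h
  have hks : ((bPairs dd).filter (fun q => q.1 == a)).map (·.2)
      = dd.keys.filter (fun key => (dd.getD key []).contains a) := by
    rw [bPairs, pairs_filter_eq, keys_filter_eq dd hnd]
  have hkeys : (bIndex dd).keys = PySem.Set.ofList ((bPairs dd).map (·.1)) := by
    have h := PySem.Dict.keys_foldl_modify_key (bPairs dd) (fun q => q.1) ([] : List String)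
      (fun _ q v => v ++ [q.2]) PySem.Dict.empty
    simpa [bIndex, PySem.Set.update_nil_left] using h
  have hmemiff : ((bIndex dd).contains a = true) ↔ a ∈ (bPairs dd).map (·.1) := by
    rw [PySem.Dict.contains_iff_mem_keys, hkeys, PySem.Set.mem_ofList]
  by_cases hf : dd.keys.filter (fun key => (dd.getD key []).contains a) = []
  · -- no matching key: the lookup misses and falls back to [a]
    have hpf : (bPairs dd).filter (fun q => q.1 == a) = [] := by
      have h := hks
      rw [hf] at h
      exact List.map_eq_nil_iff.1 h
    have hnc : (bIndex dd).contains a = false := by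
      rw [Bool.eq_false_iff]
      intro hc
      rcases List.mem_map.1 (hmemiff.1 hc) with ⟨q, hq, hqa⟩
      have hmemf : q ∈ (bPairs dd).filter (fun q' => q'.1 == a) :=
        List.mem_filter.2 ⟨hq, by simp [hqa]⟩
      rw [hpf] at hmemf
      cases hmemf
    rw [PySem.Dict.getD_of_not_contains (bIndex dd) [a] hnc, pvResolve]
    rw [if_pos (List.isEmpty_iff.2 hf)]
  · -- at least one matching key: the lookup hits and returns the matching keys
    have hc : (bIndex dd).contains a = true := by
      apply hmemiff.2
      have hne : (bPairs dd).filter (fun q => q.1 == a) ≠ [] := by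
        intro hnil
        apply hf
        rw [← hks, hnil, List.map_nil]
      rcases List.exists_mem_of_ne_nil _ hne with ⟨q, hq⟩
      rcases List.mem_filter.1 hq with ⟨hq1, hq2⟩
      exact List.mem_map.2 ⟨q, hq1, by simpa using hq2⟩
    obtain ⟨v, hv⟩ : ∃ v, (bIndex dd).get? a = some v := by
      have h := PySem.Dict.contains_eq_isSome_get? (bIndex dd) a
      rw [hc] at h
      exact Option.isSome_iff_exists.1 h.symm
    rw [PySem.Dict.getD_of_get?_eq_some (bIndex dd) [a] hv]
    rw [PySem.Dict.getD_of_get?_eq_some (bIndex dd) [] hv] at hbase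
    rw [hbase, hks, pvResolve]
    rw [if_neg (by rw [List.isEmpty_iff]; exact hf)]

-- B's inner loop over one author_list
lemma bTemp_eq (idx : PySem.Dict String (List String)) (al : List String) (t : List String) :
    al.foldl (fun t a => t ++ idx.getD a [a]) t = t ++ al.flatMap (fun a => idx.getD a [a]) := by
  induction al generalizing t with
  | nil => simp
  | cons a as ih => rw [List.foldl_cons, ih]; simp

-- B's outer loop
lemma bOuter_eq (idx : PySem.Dict String (List String)) (als : List (List String))
    (u : List String) (L : List (List String)) :
    als.foldl (bListBody idx) (u, L)
    = (u ++ (als.map (fun al => al.flatMap (fun a => idx.getD a [a]))).flatten,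
       L ++ als.map (fun al => al.flatMap (fun a => idx.getD a [a]))) := by
  induction als generalizing u L with
  | nil => simp
  | cons al rest ih =>
    rw [List.foldl_cons]
    have hstep : bListBody idx (u, L) al
        = (u ++ al.flatMap (fun a => idx.getD a [a]),
           L ++ [al.flatMap (fun a => idx.getD a [a])]) := by
      simp only [bListBody, bTemp_eq, List.nil_append]
    rw [hstep, ih]
    simp

-- ===== VERDICT =====
theorem replace_ambiguous_authors_spec : Claim_equal_replace_ambiguous_authors := by
  intro d authors author_lists _
  unfold Spec_replace_ambiguous_authors
  simp only [replace_ambiguous_authors, replace_ambiguous_authors_alt]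
  rw [outerFold_eq, bOuter_eq]
  have hnd : (PySem.Dict.ofList d).keys.Nodup := PySem.Dict.nodup_keys_ofList d
  have : (fun a => (bIndex (PySem.Dict.ofList d)).getD a [a]) = pvResolve (PySem.Dict.ofList d) := by
    funext a; exact lookup_eq_resolve _ hnd a
  rw [this]
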